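-- pv_equiv track=rewrite | github.com/ShapeLayer/training | tasks/online_judge/baekjoon/python/15903.py | compute
-- ===== SOURCE A (Python) =====
-- from heapq import heappush, heappop
--
-- def compute(n: int, m: int, a: list):
--     hq = []
--     for each in a:
--         heappush(hq, each)
--
--     for _ in range(m):
--         x = heappop(hq)
--         y = heappop(hq)
--         heappush(hq, x + y)
--         heappush(hq, x + y)
--
--     return sum(hq)
-- ===== SOURCE B (Python) =====
-- # Two-queue merge instead of a binary heap: sort once, then the two current
-- # minima are always at the fronts of the sorted input queue and the queue of
-- # produced sums (read through index pointers, no pops), because each new sum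
-- # is >= every sum still pending in the sum queue.
-- def compute(n: int, m: int, a: list):
--     q1 = sorted(a)
--     i1 = 0
--     q2 = []
--     i2 = 0
--     for _ in range(m):
--         s = 0
--         for _ in range(2):
--             if i1 < len(q1) and (i2 >= len(q2) or q1[i1] <= q2[i2]):
--                 s += q1[i1]
--                 i1 += 1
--             else:
--                 s += q2[i2]
--                 i2 += 1
--         q2.append(s)
--         q2.append(s)
--     return sum(q1[i1:]) + sum(q2[i2:])
-- ===== Notes on version B (the rewrite author's own statement) =====
-- stated objective: alternative
-- what changed: Replaces the binary heap with a sort-once two-queue scheme: the sorted input and the produced sums are consumed from the front via index pointers, the smaller front being the current minimum, so no heap operations are needed.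
import Mathlib
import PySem

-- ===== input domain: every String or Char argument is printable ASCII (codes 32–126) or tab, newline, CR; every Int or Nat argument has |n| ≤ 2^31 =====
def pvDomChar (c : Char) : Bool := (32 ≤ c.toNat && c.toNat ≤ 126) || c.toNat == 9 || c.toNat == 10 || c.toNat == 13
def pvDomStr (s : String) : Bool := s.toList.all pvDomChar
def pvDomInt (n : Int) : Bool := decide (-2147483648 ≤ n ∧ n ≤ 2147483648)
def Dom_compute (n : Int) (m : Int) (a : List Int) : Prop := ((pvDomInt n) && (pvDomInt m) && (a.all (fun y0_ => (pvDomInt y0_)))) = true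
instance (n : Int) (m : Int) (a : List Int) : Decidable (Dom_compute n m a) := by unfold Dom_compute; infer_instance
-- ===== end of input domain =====

-- B replaces A's binary heap by a sort-once two-queue scheme (alternative decomposition, similar cost).

-- ===== PORT A =====
-- heapq is modelled on the heap's multiset: heappush appends, heappop returns the
-- minimum and removes its first occurrence — exact for every value A observes
-- (each heappop result and the final sum); a heappop from an empty heap
-- (IndexError) is excluded by Pre_compute (there the model returns 0).
def pvMin (l : List Int) : Int := (l.min?).getD 0

def compute (n : Int) (m : Int) (a : List Int) : Int :=
  let hq : List Int := a.foldl (fun h e => h ++ [e]) []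
  let hq : List Int := (PySem.List.pyRange 0 m 1).foldl (fun h _ =>
    let x := pvMin h
    let h := h.erase x
    let y := pvMin h
    let h := h.erase y
    let h := h ++ [x + y]
    h ++ [x + y]) hq
  hq.sum

-- ===== PORT B =====
-- one execution of Source B's inner two-iteration loop body: take the smaller front;
-- the guarded q2[i2] read out of range raises in Python and is excluded by Pre_compute
def popB (q1 : List Int) (i1 : Nat) (q2 : List Int) (i2 : Nat) : Int × Nat × Nat :=
  if i1 < q1.length ∧ (q2.length ≤ i2 ∨ q1.getD i1 0 ≤ q2.getD i2 0)
  then (q1.getD i1 0, i1 + 1, i2)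
  else (q2.getD i2 0, i1, i2 + 1)

def compute_alt (n : Int) (m : Int) (a : List Int) : Int :=
  let q1 := PySem.List.sorted a (fun x => x) false
  let st := (PySem.List.pyRange 0 m 1).foldl (fun (st : Nat × List Int × Nat) _ =>
    let p1 := popB q1 st.1 st.2.1 st.2.2
    let p2 := popB q1 p1.2.1 st.2.1 p1.2.2
    (p2.2.1, st.2.1 ++ [p1.1 + p2.1] ++ [p1.1 + p2.1], p2.2.2)) (0, ([] : List Int), 0)
  (q1.drop st.1).sum + ((st.2.1).drop st.2.2).sum

-- ===== PRECONDITION & SPEC =====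
-- Pre_ excludes exactly the inputs where A raises IndexError: a merge step (m ≥ 1)
-- with fewer than two numbers in the list.
def Pre_compute (n : Int) (m : Int) (a : List Int) : Prop := m ≤ 0 ∨ 2 ≤ a.length
instance (n : Int) (m : Int) (a : List Int) : Decidable (Pre_compute n m a) := by unfold Pre_compute; infer_instance
def pvWitness_compute : Int × Int × List Int := (4, 2, [4, 1, 3, 2])

def Spec_compute (n : Int) (m : Int) (a : List Int) (out : Int) : Prop := out = compute_alt n m a
instance (n : Int) (m : Int) (a : List Int) (out : Int) : Decidable (Spec_compute n m a out) := by unfold Spec_compute; infer_instance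

-- ===== CLAIM (what is proved, stated in full; the proofs are below) =====
def Claim_equal_compute : Prop := ∀ (n : Int) (m : Int) (a : List Int), Dom_compute n m a → Pre_compute n m a → Spec_compute n m a (compute n m a)

-- ===== LEMMAS AND PROOFS =====

-- the A-side loop body and B-side loop body, named for the proofs
def stepA (h : List Int) : List Int :=
  ((h.erase (pvMin h)).erase (pvMin (h.erase (pvMin h))))
    ++ [pvMin h + pvMin (h.erase (pvMin h))] ++ [pvMin h + pvMin (h.erase (pvMin h))]

def stepB (q1 : List Int) (st : Nat × List Int × Nat) : Nat × List Int × Nat :=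
  let p1 := popB q1 st.1 st.2.1 st.2.2
  let p2 := popB q1 p1.2.1 st.2.1 p1.2.2
  (p2.2.1, st.2.1 ++ [p1.1 + p2.1] ++ [p1.1 + p2.1], p2.2.2)

-- abstract two-queue state: the unread remainders (r1, r2) of both queues
def popQ (p : List Int × List Int) : Int × List Int × List Int :=
  if p.1 ≠ [] ∧ (p.2 = [] ∨ p.1.headD 0 ≤ p.2.headD 0)
  then (p.1.headD 0, p.1.tail, p.2)
  else (p.2.headD 0, p.1, p.2.tail)

def astep (p : List Int × List Int) : List Int × List Int :=
  let a1 := popQ p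
  let a2 := popQ (a1.2.1, a1.2.2)
  (a2.2.1, a2.2.2 ++ [a1.1 + a2.1, a1.1 + a2.1])

-- the sum-queue invariant: r2 sorted; every pending sum is at most the sum of the
-- two smallest readable values that were ahead of it (guarded where a twin copy interferes)
def KInv (r1 r2 : List Int) : Prop :=
  r2.Pairwise (· ≤ ·) ∧
  (∀ u v t, r1 = u :: v :: t → ∀ z ∈ r2, z ≤ u + v) ∧
  (∀ u t1, r1 = u :: t1 → ∀ c t2, r2 = c :: t2 → ∀ z ∈ t2, u ≤ z → z ≤ u + c) ∧
  (∀ c d t2, r2 = c :: d :: t2 → ∀ z ∈ t2, z ≤ c + d)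

-- relation between B's fold state and the abstract remainders
def RelB (q1 : List Int) (st : Nat × List Int × Nat) (p : List Int × List Int) : Prop :=
  st.1 ≤ q1.length ∧ st.2.2 ≤ (st.2.1).length ∧ q1.drop st.1 = p.1 ∧ (st.2.1).drop st.2.2 = p.2

theorem foldl_const_fun {σ α : Type} (f : σ → σ) (l : List α) (s : σ) :
    l.foldl (fun s _ => f s) s = f^[l.length] s := by
  induction l generalizing s with
  | nil => simp
  | cons a t ih => simp [List.foldl_cons, ih, Function.iterate_succ_apply]

theorem foldl_push (l acc : List Int) : l.foldl (fun h e => h ++ [e]) acc = acc ++ l := by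
  induction l generalizing acc with
  | nil => simp
  | cons a t ih => simp [List.foldl_cons, ih]

-- pop returns the minimum and drops one element, keeping both remainders sorted
theorem popQ_spec (r1 r2 : List Int) (hs1 : r1.Pairwise (· ≤ ·)) (hs2 : r2.Pairwise (· ≤ ·))
    (hne : 1 ≤ r1.length + r2.length) :
    (r1 ++ r2).Perm ((popQ (r1, r2)).1 :: ((popQ (r1, r2)).2.1 ++ (popQ (r1, r2)).2.2)) ∧
    (∀ w ∈ r1 ++ r2, (popQ (r1, r2)).1 ≤ w) ∧
    (popQ (r1, r2)).2.1.Pairwise (· ≤ ·) ∧ (popQ (r1, r2)).2.2.Pairwise (· ≤ ·) ∧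
    (popQ (r1, r2)).2.1.length + (popQ (r1, r2)).2.2.length + 1 = r1.length + r2.length := by
  unfold popQ
  split_ifs with hc
  · obtain ⟨hne1, hor⟩ := hc
    rcases r1 with _ | ⟨u, t1⟩
    · exact absurd rfl hne1
    · simp only [List.headD_cons, List.tail_cons]
      rw [List.pairwise_cons] at hs1
      refine ⟨by simp, ?_, hs1.2, hs2, by simp only [List.length_cons]; omega⟩
      intro w hw
      simp only [List.cons_append, List.mem_cons, List.mem_append] at hw
      rcases hw with rfl | hw | hw
      · exact le_refl _
      · exact hs1.1 w hw
      · rcases hor with h2 | hle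
        · subst h2; simp at hw
        · rcases r2 with _ | ⟨c, t2⟩
          · simp at hw
          · simp only [List.headD_cons] at hle
            rcases List.mem_cons.mp hw with rfl | hw
            · exact hle
            · exact le_trans hle ((List.pairwise_cons.mp hs2).1 w hw)
  · push Not at hc
    have hr2 : r2 ≠ [] := by
      intro h2
      rcases r1 with _ | ⟨u, t1⟩
      · simp [h2] at hne
      · exact absurd (hc (by simp)).1 (by simp [h2])
    rcases r2 with _ | ⟨c, t2⟩
    · exact absurd rfl hr2
    simp only [List.headD_cons, List.tail_cons]
    rw [List.pairwise_cons] at hs2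
    refine ⟨List.perm_middle, ?_, hs1, hs2.2, by simp only [List.length_cons]; omega⟩
    intro w hw
    rcases List.mem_append.mp hw with hw | hw
    · rcases r1 with _ | ⟨u, t1⟩
      · simp at hw
      · have hlt := (hc (by simp)).2
        simp only [List.headD_cons] at hlt
        rcases List.mem_cons.mp hw with rfl | hw
        · exact le_of_lt hlt
        · exact le_trans (le_of_lt hlt) ((List.pairwise_cons.mp hs1).1 w hw)
    · rcases List.mem_cons.mp hw with rfl | hw
      · exact le_refl _
      · exact hs2.1 w hw

-- pvMin / erase of a list permuted to (x :: t) with x minimal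
theorem pvMin_erase (h t : List Int) (x : Int) (hp : h.Perm (x :: t)) (hmin : ∀ b ∈ x :: t, x ≤ b) :
    pvMin h = x ∧ (h.erase x).Perm t := by
  have hx : h.min? = some x := by
    refine List.min?_eq_some_iff.mpr ⟨hp.symm.subset (by simp), ?_⟩
    intro b hb; exact hmin b (hp.subset hb)
  refine ⟨by simp [pvMin, hx], ?_⟩
  have := hp.erase x
  simpa [List.erase_cons_head] using this

-- appending the two copies of the fresh sum keeps the invariant, given the
-- per-shape arithmetic obligations
theorem KInv_append (r1n r2p : List Int) (s : Int)
    (hp : r2p.Pairwise (· ≤ ·))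
    (hub : ∀ z ∈ r2p, z ≤ s)
    (hA : ∀ u v t, r1n = u :: v :: t → (∀ z ∈ r2p, z ≤ u + v) ∧ s ≤ u + v)
    (hB0 : ∀ u t1, r1n = u :: t1 → r2p = [] → u ≤ s → 0 ≤ u)
    (hB1 : ∀ u t1 c t2, r1n = u :: t1 → r2p = c :: t2 →
      (∀ z ∈ t2, u ≤ z → z ≤ u + c) ∧ (u ≤ s → s ≤ u + c))
    (hC1 : ∀ c, r2p = [c] → 0 ≤ c)
    (hC2 : ∀ c d t2, r2p = c :: d :: t2 → (∀ z ∈ t2, z ≤ c + d) ∧ s ≤ c + d) :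
    KInv r1n (r2p ++ [s, s]) := by
  refine ⟨?_, ?_, ?_, ?_⟩
  · rw [List.pairwise_append]
    refine ⟨hp, by simp, ?_⟩
    intro z hz w hw
    rcases List.mem_cons.mp hw with rfl | hw
    · exact hub z hz
    · simp only [List.mem_singleton] at hw
      subst hw
      exact hub z hz
  · intro u v t h z hz
    rcases List.mem_append.mp hz with hz | hz
    · exact ((hA u v t h).1) z hz
    · have : z = s := by
        rcases List.mem_cons.mp hz with rfl | hz
        · rfl
        · simpa using hz
      subst this
      exact (hA u v t h).2
  · intro u t1 h c t2full h2 z hz hguard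
    rcases r2p with _ | ⟨c0, t2p⟩
    · simp only [List.nil_append, List.cons.injEq] at h2
      obtain ⟨rfl, h2⟩ := h2
      subst h2
      have hz' : z = s := by simpa using hz
      subst hz'
      have := hB0 u t1 h rfl hguard
      omega
    · simp only [List.cons_append, List.cons.injEq] at h2
      obtain ⟨rfl, h2⟩ := h2
      subst h2
      rcases List.mem_append.mp hz with hz | hz
      · exact (hB1 u t1 c0 t2p h rfl).1 z hz hguard
      · have hz' : z = s := by
          rcases List.mem_cons.mp hz with rfl | hz
          · rfl
          · simpa using hz
        subst hz'
        exact (hB1 u t1 c0 t2p h rfl).2 hguard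
  · intro c d t2full h2 z hz
    rcases r2p with _ | ⟨c0, t2p⟩
    · simp only [List.nil_append, List.cons.injEq] at h2
      obtain ⟨rfl, rfl, h2⟩ := h2
      subst h2
      simp at hz
    · rcases t2p with _ | ⟨d0, t2q⟩
      · simp only [List.cons_append, List.nil_append, List.cons.injEq] at h2
        obtain ⟨rfl, rfl, h2⟩ := h2
        subst h2
        have hz' : z = s := by simpa using hz
        subst hz'
        have := hC1 c0 rfl
        omega
      · simp only [List.cons_append, List.cons.injEq] at h2
        obtain ⟨rfl, rfl, h2⟩ := h2
        subst h2
        rcases List.mem_append.mp hz with hz | hz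
        · exact (hC2 c0 d0 t2q rfl).1 z hz
        · have hz' : z = s := by
            rcases List.mem_cons.mp hz with rfl | hz
            · rfl
            · simpa using hz
          subst hz'
          exact (hC2 c0 d0 t2q rfl).2

-- the two pops of a step preserve the invariant
theorem KInv_step (r1 r2 : List Int) (hs1 : r1.Pairwise (· ≤ ·)) (hK : KInv r1 r2)
    (hlen : 2 ≤ r1.length + r2.length) :
    (astep (r1, r2)).1.Pairwise (· ≤ ·) ∧ KInv (astep (r1, r2)).1 (astep (r1, r2)).2 := by
  obtain ⟨hP, hK1, hK2, hK3⟩ := hK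
  rcases r1 with _ | ⟨u, t1⟩
  · -- r1 = []: both pops from r2
    rcases r2 with _ | ⟨c, t2⟩
    · simp at hlen
    rcases t2 with _ | ⟨d, t2'⟩
    · simp at hlen
    have hcd : c ≤ d := (List.pairwise_cons.mp hP).1 d (by simp)
    have hcz : ∀ z ∈ t2', c ≤ z := fun z hz => (List.pairwise_cons.mp hP).1 z (by simp [hz])
    have hP2 := List.pairwise_cons.mp (List.pairwise_cons.mp hP).2
    have hdz : ∀ z ∈ t2', d ≤ z := hP2.1
    have hzz : ∀ z ∈ t2', z ≤ c + d := fun z hz => hK3 c d t2' rfl z hz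
    have hstep : astep (([] : List Int), c :: d :: t2') = ([], t2' ++ [c + d, c + d]) := by
      simp [astep, popQ]
    rw [hstep]
    refine ⟨List.Pairwise.nil, KInv_append _ _ _ hP2.2 hzz ?_ ?_ ?_ ?_ ?_⟩
    · intro u v t h; simp at h
    · intro u t1 h; simp at h
    · intro u t1 c' t2x h; simp at h
    · intro e he
      have h1 := hzz e (by simp [he])
      have h2 := hcz e (by simp [he])
      have h3 := hdz e (by simp [he])
      omega
    · intro e f t3 he
      have hce := hcz e (by simp [he])
      have hdf := hdz f (by simp [he])
      constructor
      · intro z hz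
        have := hzz z (by simp [he, hz])
        omega
      · omega
  · -- r1 = u :: t1
    have hu1 := List.pairwise_cons.mp hs1
    rcases r2 with _ | ⟨c, t2⟩
    · -- r2 = []: both pops from r1
      rcases t1 with _ | ⟨v, t1'⟩
      · simp at hlen
      have huv : u ≤ v := hu1.1 v (by simp)
      have huz : ∀ z ∈ t1', u ≤ z := fun z hz => hu1.1 z (by simp [hz])
      have hv1 := List.pairwise_cons.mp hu1.2
      have hvz : ∀ z ∈ t1', v ≤ z := hv1.1
      have hstep : astep (u :: v :: t1', ([] : List Int)) = (t1', [u + v, u + v]) := by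
        simp [astep, popQ]
      rw [hstep]
      refine ⟨hv1.2, ?_⟩
      have h := KInv_append t1' [] (u + v) List.Pairwise.nil (by simp) ?_ ?_ ?_ ?_ ?_
      · simpa using h
      · intro u' v' t h
        subst h
        have h1 := hvz u' (by simp)
        have h2 := hvz v' (by simp)
        exact ⟨by simp, by omega⟩
      · intro u' t h _ hus
        subst h
        have h1 := huz u' (by simp)
        have h2 := hvz u' (by simp)
        omega
      · intro u' t c' t2x h hx; simp at hx
      · intro c' h; simp at h
      · intro c' d' t2x h; simp at h
    · -- r2 = c :: t2
      have hc1 := List.pairwise_cons.mp hP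
      have hcz : ∀ z ∈ t2, c ≤ z := hc1.1
      by_cases huc : u ≤ c
      · rcases t1 with _ | ⟨v, t1'⟩
        · -- r1 = [u]: pops u then c
          have hstep : astep ([u], c :: t2) = ([], t2 ++ [u + c, u + c]) := by
            simp [astep, popQ, huc]
          rw [hstep]
          have hzs : ∀ z ∈ t2, z ≤ u + c := by
            intro z hz
            exact hK2 u [] rfl c t2 rfl z hz (le_trans huc (hcz z hz))
          refine ⟨List.Pairwise.nil, KInv_append _ _ _ hc1.2 hzs ?_ ?_ ?_ ?_ ?_⟩
          · intro a b t h; simp at h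
          · intro a t h; simp at h
          · intro a t c' t2x h; simp at h
          · intro e he
            have h1 := hzs e (by simp [he])
            have h2 := hcz e (by simp [he])
            omega
          · intro e f t3 he
            have hce := hcz e (by simp [he])
            have hcf := hcz f (by simp [he])
            have hef : e ≤ f := by
              have := List.pairwise_cons.mp (he ▸ hc1.2)
              exact this.1 f (by simp)
            constructor
            · intro z hz
              have := hzs z (by simp [he, hz])
              omega
            · omega
        · have huv : u ≤ v := hu1.1 v (by simp)
          have huz : ∀ z ∈ t1', u ≤ z := fun z hz => hu1.1 z (by simp [hz])
          have hv1 := List.pairwise_cons.mp hu1.2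
          have hvz : ∀ z ∈ t1', v ≤ z := hv1.1
          by_cases hvc : v ≤ c
          · -- pops u then v (both from r1)
            have hstep : astep (u :: v :: t1', c :: t2) = (t1', (c :: t2) ++ [u + v, u + v]) := by
              simp [astep, popQ, huc, hvc]
            rw [hstep]
            have hzuv : ∀ z ∈ c :: t2, z ≤ u + v := fun z hz => hK1 u v t1' rfl z hz
            refine ⟨hv1.2, KInv_append _ _ _ hP hzuv ?_ ?_ ?_ ?_ ?_⟩
            · intro u' v' t h
              subst h
              have h1 := hvz u' (by simp)
              have h2 := hvz v' (by simp)
              refine ⟨?_, by omega⟩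
              intro z hz
              have := hzuv z hz
              omega
            · intro u' t h hx; simp at hx
            · intro u' t c' t2x h hx
              subst h
              simp only [List.cons.injEq] at hx
              obtain ⟨rfl, rfl⟩ := hx
              have h1 := huz u' (by simp)
              constructor
              · intro z hz hg
                have := hK2 u (v :: u' :: t) rfl c t2 rfl z hz (by omega)
                omega
              · intro _
                have h2 := hvz u' (by simp)
                omega
            · intro c0 h
              have h1 : c = c0 := (List.cons_eq_cons.mp h).1
              have h2 := hzuv c (by simp)
              omega
            · intro c0 d0 t3 h
              have h1 : c = c0 := (List.cons_eq_cons.mp h).1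
              have h2 : t2 = d0 :: t3 := (List.cons_eq_cons.mp h).2
              have h3 : c ≤ d0 := hcz d0 (by rw [h2]; simp)
              refine ⟨hK3 c0 d0 t3 h, by omega⟩
          · -- pops u then c (one from each queue)
            have hstep : astep (u :: v :: t1', c :: t2) = (v :: t1', t2 ++ [u + c, u + c]) := by
              simp [astep, popQ, huc, hvc]
            rw [hstep]
            have hzs : ∀ z ∈ t2, z ≤ u + c := by
              intro z hz
              exact hK2 u (v :: t1') rfl c t2 rfl z hz (le_trans huc (hcz z hz))
            refine ⟨hu1.2, KInv_append _ _ _ hc1.2 hzs ?_ ?_ ?_ ?_ ?_⟩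
            · intro u' v' t h
              simp only [List.cons.injEq] at h
              obtain ⟨rfl, h⟩ := h
              have h1 : v' ∈ t1' := by rw [h]; simp
              have h2 := hvz v' h1
              refine ⟨?_, by omega⟩
              intro z hz
              have := hzs z hz
              omega
            · intro u' t h _ hg
              simp only [List.cons.injEq] at h
              obtain ⟨rfl, h⟩ := h
              omega
            · intro u' t c' t2x h hx
              simp only [List.cons.injEq] at h
              obtain ⟨rfl, h⟩ := h
              subst hx
              have hcc : c ≤ c' := hcz c' (by simp)
              constructor
              · intro z hz _
                have := hK3 c c' t2x rfl z hz
                omega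
              · intro _
                omega
            · intro e he
              have h1 := hzs e (by simp [he])
              have h2 := hcz e (by simp [he])
              omega
            · intro e f t3 he
              have hce := hcz e (by simp [he])
              have hcf := hcz f (by simp [he])
              constructor
              · intro z hz
                have := hK3 c e (f :: t3) (by rw [he]) z (by simp [hz])
                omega
              · omega
      · -- c < u: first pop from r2
        push Not at huc
        rcases t2 with _ | ⟨d, t2'⟩
        · -- r2 = [c]: pops c then u
          have hstep : astep (u :: t1, [c]) = (t1, [c + u, c + u]) := by
            simp [astep, popQ, not_le.mpr huc]
          rw [hstep]
          refine ⟨hu1.2, ?_⟩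
          have h := KInv_append t1 [] (c + u) List.Pairwise.nil (by simp) ?_ ?_ ?_ ?_ ?_
          · simpa using h
          · intro u' v' t h
            subst h
            have h1 := hu1.1 u' (by simp)
            have h2 := hu1.1 v' (by simp)
            exact ⟨by simp, by omega⟩
          · intro u' t h _ hus
            subst h
            have h1 := hu1.1 u' (by simp)
            omega
          · intro u' t c' t2x h hx; simp at hx
          · intro c' h; simp at h
          · intro c' d' t2x h; simp at h
        · have hcd : c ≤ d := hcz d (by simp)
          have hdz : ∀ z ∈ t2', d ≤ z := (List.pairwise_cons.mp hc1.2).1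
          have hdzz : ∀ z ∈ t2', z ≤ c + d := fun z hz => hK3 c d t2' rfl z hz
          by_cases hud : u ≤ d
          · -- pops c then u
            have hstep : astep (u :: t1, c :: d :: t2') = (t1, (d :: t2') ++ [c + u, c + u]) := by
              simp [astep, popQ, not_le.mpr huc, hud]
            rw [hstep]
            have hds : d ≤ c + u := by
              have := hK2 u t1 rfl c (d :: t2') rfl d (by simp) hud
              omega
            have hzs : ∀ z ∈ d :: t2', z ≤ c + u := by
              intro z hz
              rcases List.mem_cons.mp hz with rfl | hz
              · exact hds
              · have := hK2 u t1 rfl c (d :: t2') rfl z (by simp [hz]) (le_trans hud (hdz z hz))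
                omega
            refine ⟨hu1.2, KInv_append _ _ _ hc1.2 hzs ?_ ?_ ?_ ?_ ?_⟩
            · intro u' v' t h
              subst h
              have h1 := hu1.1 u' (by simp)
              have h2 := hu1.1 v' (by simp)
              refine ⟨?_, by omega⟩
              intro z hz
              have := hzs z hz
              omega
            · intro u' t h hx; simp at hx
            · intro u' t c' t2x h hx
              subst h
              simp only [List.cons.injEq] at hx
              obtain ⟨rfl, rfl⟩ := hx
              have h1 := hu1.1 u' (by simp)
              constructor
              · intro z hz _
                have := hdzz z hz
                omega
              · intro _
                omega
            · intro e he
              have h1 : d = e := (List.cons_eq_cons.mp he).1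
              have h2 := hK2 u t1 rfl c (d :: t2') rfl d (by simp) hud
              omega
            · intro e f t3 he
              have h1 : d = e := (List.cons_eq_cons.mp he).1
              have h2 : t2' = f :: t3 := (List.cons_eq_cons.mp he).2
              have hef : d ≤ f := hdz f (by rw [h2]; simp)
              constructor
              · intro z hz
                have hzm : z ∈ t2' := by rw [h2]; simp [hz]
                have h3 := hdzz z hzm
                omega
              · omega
          · -- pops c then d (both from r2)
            push Not at hud
            have hstep : astep (u :: t1, c :: d :: t2') = (u :: t1, t2' ++ [c + d, c + d]) := by
              simp [astep, popQ, not_le.mpr huc, not_le.mpr hud]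
            rw [hstep]
            have hP2 := List.pairwise_cons.mp hc1.2
            refine ⟨hs1, KInv_append _ _ _ hP2.2 hdzz ?_ ?_ ?_ ?_ ?_⟩
            · intro u' v' t h
              simp only [List.cons.injEq] at h
              obtain ⟨rfl, h⟩ := h
              have h2 : v' ∈ t1 := by rw [h]; simp
              have h3 := hu1.1 v' h2
              refine ⟨?_, by omega⟩
              intro z hz
              have := hdzz z hz
              omega
            · intro u' t h hx hg
              simp only [List.cons.injEq] at h
              obtain ⟨rfl, h⟩ := h
              omega
            · intro u' t c' t2x h hx
              simp only [List.cons.injEq] at h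
              obtain ⟨rfl, h⟩ := h
              subst hx
              have hdc : d ≤ c' := hdz c' (by simp)
              constructor
              · intro z hz _
                have := hdzz z (by simp [hz])
                omega
              · intro _
                omega
            · intro e he
              have h1 := hdzz e (by simp [he])
              have h2 := hdz e (by simp [he])
              omega
            · intro e f t3 he
              have hde := hdz e (by simp [he])
              have hdf := hdz f (by simp [he])
              constructor
              · intro z hz
                have := hdzz z (by simp [he, hz])
                omega
              · omega

-- the heap step tracks the abstract step through the permutation
theorem stepA_perm (r1 r2 h : List Int) (hs1 : r1.Pairwise (· ≤ ·)) (hK : KInv r1 r2)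
    (hlen : 2 ≤ r1.length + r2.length) (hp : h.Perm (r1 ++ r2)) :
    (stepA h).Perm ((astep (r1, r2)).1 ++ (astep (r1, r2)).2) ∧
    (astep (r1, r2)).1.length + (astep (r1, r2)).2.length = r1.length + r2.length := by
  obtain ⟨hperm1, hmin1, hsa, hsb, hlen1⟩ := popQ_spec r1 r2 hs1 hK.1 (by omega)
  set x := (popQ (r1, r2)).1 with hxdef
  set r1' := (popQ (r1, r2)).2.1 with hr1'def
  set r2' := (popQ (r1, r2)).2.2 with hr2'def
  have hp1 : h.Perm (x :: (r1' ++ r2')) := hp.trans hperm1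
  have hmin1' : ∀ b ∈ x :: (r1' ++ r2'), x ≤ b := by
    intro b hb
    rcases List.mem_cons.mp hb with rfl | hb
    · exact le_refl _
    · exact hmin1 b (hperm1.symm.subset (List.mem_cons_of_mem _ hb))
  obtain ⟨hxe, hpe⟩ := pvMin_erase h (r1' ++ r2') x hp1 hmin1'
  obtain ⟨hperm2, hmin2, hsc, hsd, hlen2⟩ := popQ_spec r1' r2' hsa hsb (by omega)
  set y := (popQ (r1', r2')).1 with hydef
  set r1'' := (popQ (r1', r2')).2.1 with hr1''def
  set r2'' := (popQ (r1', r2')).2.2 with hr2''def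
  have hp2 : (h.erase x).Perm (y :: (r1'' ++ r2'')) := hpe.trans hperm2
  have hmin2' : ∀ b ∈ y :: (r1'' ++ r2''), y ≤ b := by
    intro b hb
    rcases List.mem_cons.mp hb with rfl | hb
    · exact le_refl _
    · exact hmin2 b (hperm2.symm.subset (List.mem_cons_of_mem _ hb))
  obtain ⟨hye, hpe2⟩ := pvMin_erase (h.erase x) (r1'' ++ r2'') y hp2 hmin2'
  have hstep : stepA h = ((h.erase x).erase y) ++ [x + y] ++ [x + y] := by
    rw [stepA, hxe, hye]
  have hgoal1 : (stepA h).Perm (r1'' ++ (r2'' ++ [x + y, x + y])) := by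
    rw [hstep]
    have h1 := (hpe2.append_right [x + y]).append_right [x + y]
    refine h1.trans ?_
    have : (r1'' ++ r2'') ++ [x + y] ++ [x + y] = r1'' ++ (r2'' ++ [x + y, x + y]) := by
      simp [List.append_assoc]
    rw [this]
  constructor
  · exact hgoal1
  · show r1''.length + (r2'' ++ [x + y, x + y]).length = r1.length + r2.length
    simp only [List.length_append, List.length_cons, List.length_nil]
    omega

-- one popB matches one popQ through the index/remainder correspondence
theorem popB_bridge (q1 q2 : List Int) (i1 i2 : Nat) (r1 r2 : List Int)
    (h1 : i1 ≤ q1.length) (h2 : i2 ≤ q2.length)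
    (hd1 : q1.drop i1 = r1) (hd2 : q2.drop i2 = r2) (hne : 1 ≤ r1.length + r2.length) :
    (popB q1 i1 q2 i2).1 = (popQ (r1, r2)).1 ∧
    (popB q1 i1 q2 i2).2.1 ≤ q1.length ∧ (popB q1 i1 q2 i2).2.2 ≤ q2.length ∧
    q1.drop (popB q1 i1 q2 i2).2.1 = (popQ (r1, r2)).2.1 ∧
    q2.drop (popB q1 i1 q2 i2).2.2 = (popQ (r1, r2)).2.2 ∧
    (popQ (r1, r2)).2.1.length + (popQ (r1, r2)).2.2.length + 1 = r1.length + r2.length := by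
  have hl1 : r1.length = q1.length - i1 := by rw [← hd1, List.length_drop]
  have hl2 : r2.length = q2.length - i2 := by rw [← hd2, List.length_drop]
  have hcond1 : (i1 < q1.length) ↔ r1 ≠ [] := by
    rw [← List.length_pos_iff, hl1]; omega
  have hcond2 : (q2.length ≤ i2) ↔ r2 = [] := by
    rw [← List.length_eq_zero_iff, hl2]; omega
  have hv1 : q1.getD i1 0 = r1.headD 0 := by
    rw [← hd1, List.headD_eq_head?, List.head?_drop, List.getD_eq_getElem?_getD]
  have hv2 : q2.getD i2 0 = r2.headD 0 := by
    rw [← hd2, List.headD_eq_head?, List.head?_drop, List.getD_eq_getElem?_getD]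
  have htail1 : q1.drop (i1 + 1) = r1.tail := by rw [← hd1, List.tail_drop]
  have htail2 : q2.drop (i2 + 1) = r2.tail := by rw [← hd2, List.tail_drop]
  unfold popB popQ
  by_cases hb : i1 < q1.length ∧ (q2.length ≤ i2 ∨ q1.getD i1 0 ≤ q2.getD i2 0)
  · have hb' : r1 ≠ [] ∧ (r2 = [] ∨ r1.headD 0 ≤ r2.headD 0) := by
      refine ⟨hcond1.mp hb.1, ?_⟩
      rcases hb.2 with h | h
      · exact Or.inl (hcond2.mp h)
      · exact Or.inr (by rw [← hv1, ← hv2]; exact h)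
    rw [if_pos hb, if_pos hb']
    have hlt : i1 < q1.length := hb.1
    refine ⟨hv1, by show i1 + 1 ≤ q1.length; omega, h2, htail1, hd2, ?_⟩
    have : r1 ≠ [] := hb'.1
    rcases r1 with _ | ⟨u, t⟩
    · exact absurd rfl this
    · simp only [List.tail_cons, List.length_cons]; omega
  · have hb' : ¬(r1 ≠ [] ∧ (r2 = [] ∨ r1.headD 0 ≤ r2.headD 0)) := by
      intro hx
      exact hb ⟨hcond1.mpr hx.1, by
        rcases hx.2 with h | h
        · exact Or.inl (hcond2.mpr h)
        · exact Or.inr (by rw [hv1, hv2]; exact h)⟩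
    rw [if_neg hb, if_neg hb']
    have hr2 : r2 ≠ [] := by
      intro h2e
      apply hb'
      refine ⟨?_, Or.inl h2e⟩
      rw [← List.length_pos_iff]
      rw [h2e] at hne
      simp only [List.length_nil, Nat.add_zero] at hne
      omega
    have hi2 : i2 < q2.length := by
      have : 0 < r2.length := List.length_pos_iff.mpr hr2
      omega
    refine ⟨hv2, h1, by show i2 + 1 ≤ q2.length; omega, hd1, htail2, ?_⟩
    rcases r2 with _ | ⟨c, t⟩
    · exact absurd rfl hr2
    · simp only [List.tail_cons, List.length_cons]; omega

-- B's fold step tracks the abstract step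
theorem stepB_rel (q1 : List Int) (st : Nat × List Int × Nat) (p : List Int × List Int)
    (hr : RelB q1 st p) (hlen : 2 ≤ p.1.length + p.2.length) :
    RelB q1 (stepB q1 st) (astep p) := by
  obtain ⟨hi1, hi2, hd1, hd2⟩ := hr
  obtain ⟨he1, hb1, hb2, he2, he3, hlen1⟩ :=
    popB_bridge q1 st.2.1 st.1 st.2.2 p.1 p.2 hi1 hi2 hd1 hd2 (by omega)
  obtain ⟨hf1, hc1, hc2, hf2, hf3, hlen2⟩ :=
    popB_bridge q1 st.2.1 (popB q1 st.1 st.2.1 st.2.2).2.1 (popB q1 st.1 st.2.1 st.2.2).2.2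
      (popQ (p.1, p.2)).2.1 (popQ (p.1, p.2)).2.2 hb1 hb2 he2 he3 (by omega)
  unfold stepB astep
  have hs : (popB q1 st.1 st.2.1 st.2.2).1 + (popB q1 (popB q1 st.1 st.2.1 st.2.2).2.1 st.2.1 (popB q1 st.1 st.2.1 st.2.2).2.2).1
      = (popQ (p.1, p.2)).1 + (popQ ((popQ (p.1, p.2)).2.1, (popQ (p.1, p.2)).2.2)).1 := by
    rw [he1, hf1]
  refine ⟨hc1, ?_, ?_, ?_⟩
  · simp only [List.length_append, List.length_cons]
    omega
  · exact hf2
  · rw [List.drop_append_of_le_length (by simp; omega),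
        List.drop_append_of_le_length (by omega), hf3, hs]
    simp

theorem master (q1 : List Int) (hq1 : q1.Pairwise (· ≤ ·)) (hlen : 2 ≤ q1.length)
    (h0 : List Int) (hp0 : h0.Perm q1) (k : Nat) :
    (astep^[k] (q1, ([] : List Int))).1.Pairwise (· ≤ ·) ∧
    KInv (astep^[k] (q1, ([] : List Int))).1 (astep^[k] (q1, ([] : List Int))).2 ∧
    (astep^[k] (q1, ([] : List Int))).1.length + (astep^[k] (q1, ([] : List Int))).2.length = q1.length ∧
    (stepA^[k] h0).Perm ((astep^[k] (q1, ([] : List Int))).1 ++ (astep^[k] (q1, ([] : List Int))).2) ∧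
    RelB q1 ((stepB q1)^[k] (0, ([] : List Int), 0)) (astep^[k] (q1, ([] : List Int))) := by
  induction k with
  | zero =>
    refine ⟨hq1, ⟨List.Pairwise.nil, ?_, ?_, ?_⟩, by simp, by simpa using hp0, ?_⟩
    · intro u v t h z hz; simp at hz
    · intro u t1 h c t2 h2; simp at h2
    · intro c d t2 h2; simp at h2
    · exact ⟨by simp, by simp, by simp, by simp⟩
  | succ k ih =>
    obtain ⟨hps, hk, hl, hpa, hrb⟩ := ih
    have hlen2 : 2 ≤ (astep^[k] (q1, ([] : List Int))).1.length + (astep^[k] (q1, ([] : List Int))).2.length := by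
      omega
    have h1 := KInv_step _ _ hps hk hlen2
    have h2 := stepA_perm _ _ _ hps hk hlen2 hpa
    have h3 := stepB_rel q1 _ _ hrb hlen2
    rw [Function.iterate_succ_apply', Function.iterate_succ_apply', Function.iterate_succ_apply']
    exact ⟨h1.1, h1.2, by rw [h2.2]; exact hl, h2.1, h3⟩

theorem compute_eq (n m : Int) (a : List Int) (hpre : Pre_compute n m a) :
    compute n m a = compute_alt n m a := by
  have hA : compute n m a
      = (stepA^[(PySem.List.pyRange 0 m 1).length] (a.foldl (fun h e => h ++ [e]) [])).sum := by
    have : compute n m a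
        = ((PySem.List.pyRange 0 m 1).foldl (fun h (_ : Int) => stepA h)
            (a.foldl (fun h e => h ++ [e]) [])).sum := rfl
    rw [this, foldl_const_fun stepA]
  rw [foldl_push, List.nil_append] at hA
  set q1 := PySem.List.sorted a (fun x => x) false with hq1def
  have hB : compute_alt n m a
      = (q1.drop ((stepB q1)^[(PySem.List.pyRange 0 m 1).length] (0, ([] : List Int), 0)).1).sum
        + ((((stepB q1)^[(PySem.List.pyRange 0 m 1).length] (0, ([] : List Int), 0)).2.1).drop
            ((stepB q1)^[(PySem.List.pyRange 0 m 1).length] (0, ([] : List Int), 0)).2.2).sum := by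
    have : compute_alt n m a
        = (q1.drop (((PySem.List.pyRange 0 m 1).foldl (fun st (_ : Int) => stepB q1 st) (0, ([] : List Int), 0)).1)).sum
          + (((((PySem.List.pyRange 0 m 1).foldl (fun st (_ : Int) => stepB q1 st) (0, ([] : List Int), 0)).2.1)).drop
              (((PySem.List.pyRange 0 m 1).foldl (fun st (_ : Int) => stepB q1 st) (0, ([] : List Int), 0)).2.2)).sum := rfl
    rw [this, foldl_const_fun (stepB q1)]
  have hperm : a.Perm q1 := (PySem.List.sorted_perm a (fun x => x) false).symm
  have hq1p : q1.Pairwise (· ≤ ·) := PySem.List.sorted_pairwise a (fun x => x)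
  have hlenq : q1.length = a.length := PySem.List.length_sorted a (fun x => x) false
  rcases Nat.eq_zero_or_pos (PySem.List.pyRange 0 m 1).length with hz | hpos
  · rw [hz] at hA hB
    simp only [Function.iterate_zero, id] at hA hB
    rw [hA, hB]
    simp [hperm.sum_eq]
  · have hm : 2 ≤ a.length := by
      rcases hpre with hm0 | h2
      · exfalso
        rw [PySem.List.length_pyRange_one] at hpos
        omega
      · exact h2
    obtain ⟨_, _, _, hpa, hrb⟩ := master q1 hq1p (by omega) a hperm (PySem.List.pyRange 0 m 1).length
    obtain ⟨_, _, hd1, hd2⟩ := hrb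
    rw [hA, hB, hd1, hd2, ← List.sum_append]
    exact hpa.sum_eq

-- ===== VERDICT (by name: the statement is the Claim_ definition above) =====
theorem compute_spec : Claim_equal_compute := by
  intro n m a _ hpre
  unfold Spec_compute
  exact compute_eq n m a hpre
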